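-- pv_equiv track=rewrite | github.com/grapheneaffiliate/h4-polytopic-attention | solve_arc_b19.py | solve_c0f76784
-- ===== SOURCE A (Python) =====
-- def solve_c0f76784(grid):
--     rows = len(grid)
--     cols = len(grid[0])
--     output = [row[:] for row in grid]
--     visited = [[False]*cols for _ in range(rows)]
--
--     def find_rect(r, c):
--         from collections import deque
--         q = deque([(r, c)])
--         visited[r][c] = True
--         cells = [(r, c)]
--         while q:
--             cr, cc = q.popleft()
--             for dr, dc in [(-1,0),(1,0),(0,-1),(0,1)]:
--                 nr, nc = cr+dr, cc+dc
--                 if 0 <= nr < rows and 0 <= nc < cols and not visited[nr][nc] and grid[nr][nc] == 5: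
--                     visited[nr][nc] = True
--                     q.append((nr, nc))
--                     cells.append((nr, nc))
--         min_r = min(x[0] for x in cells)
--         max_r = max(x[0] for x in cells)
--         min_c = min(x[1] for x in cells)
--         max_c = max(x[1] for x in cells)
--         return min_r, max_r, min_c, max_c
--
--     for r in range(rows):
--         for c in range(cols):
--             if grid[r][c] == 5 and not visited[r][c]:
--                 r1, r2, c1, c2 = find_rect(r, c)
--                 int_h = r2 - r1 - 1
--                 int_w = c2 - c1 - 1
--                 if int_h > 0 and int_w > 0:
--                     fill_color = 5 + min(int_h, int_w)
--                     for ir in range(r1+1, r2):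
--                         for ic in range(c1+1, c2):
--                             output[ir][ic] = fill_color
--     return output
-- ===== SOURCE B (Python) =====
-- def solve_c0f76784(grid):
--     rows = len(grid)
--     cols = len(grid[0])
--     visited = set()
--     plan = []  # fill boxes in discovery order: (r1, r2, c1, c2, color)
--     for idx in range(rows * cols):
--         r, c = divmod(idx, cols)
--         if grid[r][c] == 5 and (r, c) not in visited:
--             # iterative DFS with an explicit stack, tracking a running bounding box
--             visited.add((r, c))
--             stack = [(r, c)]
--             r1 = r2 = r
--             c1 = c2 = c
--             while stack:
--                 cr, cc = stack.pop()
--                 r1 = min(r1, cr)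
--                 r2 = max(r2, cr)
--                 c1 = min(c1, cc)
--                 c2 = max(c2, cc)
--                 for n in ((cr - 1, cc), (cr + 1, cc), (cr, cc - 1), (cr, cc + 1)):
--                     if 0 <= n[0] < rows and 0 <= n[1] < cols and n not in visited and grid[n[0]][n[1]] == 5:
--                         visited.add(n)
--                         stack.append(n)
--             if r2 - r1 > 1 and c2 - c1 > 1:
--                 plan.append((r1, r2, c1, c2, 5 + min(r2 - r1, c2 - c1) - 1))
--     # render: each cell takes the colour of the last planned box whose open interior covers it
--     def cell(i, j, v):
--         for (a, b, x, y, col) in reversed(plan):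
--             if a < i < b and x < j < y:
--                 return col
--         return v
--     return [[cell(i, j, v) for j, v in enumerate(row)] for i, row in enumerate(grid)]
-- ===== Notes on version B (the rewrite author's own statement) =====
-- stated objective: alternative
-- what changed: BFS with a deque and a bool visited matrix per component is replaced by an iterative DFS on an explicit stack with a visited set and a running bounding box (no cells list, no four min/max passes); the grid is scanned by one flattened divmod loop instead of nested row/column loops, fills are collected as a plan of boxes and the output is rendered in a single final pass (last covering box wins) instead of mutating a copy in place.
import Mathlib
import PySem

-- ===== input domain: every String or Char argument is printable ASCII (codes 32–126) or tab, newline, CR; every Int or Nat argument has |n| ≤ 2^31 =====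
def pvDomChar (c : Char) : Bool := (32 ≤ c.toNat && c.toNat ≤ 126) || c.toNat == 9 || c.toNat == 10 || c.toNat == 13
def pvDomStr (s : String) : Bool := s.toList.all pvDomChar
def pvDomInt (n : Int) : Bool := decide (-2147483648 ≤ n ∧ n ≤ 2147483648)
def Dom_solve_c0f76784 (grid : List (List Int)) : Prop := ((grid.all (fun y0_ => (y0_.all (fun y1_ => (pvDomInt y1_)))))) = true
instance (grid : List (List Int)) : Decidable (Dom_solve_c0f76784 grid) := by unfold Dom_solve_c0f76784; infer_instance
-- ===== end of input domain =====

-- B replaces the per-component BFS (deque + bool visited matrix + cells list + four min/max passes)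
-- by an iterative DFS on an explicit stack with a visited set and a running bounding box, scans the
-- grid by one flattened divmod loop, and renders the output in one final pass from a plan of boxes
-- instead of mutating a copy in place (objective: alternative; same return value).

-- ===== PORT A =====
-- grid[r][c]; A reads it only under the guards 0 ≤ r < rows, 0 ≤ c < cols, where getD/toNat is exact
def pvCell (grid : List (List Int)) (r c : Int) : Int := (grid.getD r.toNat []).getD c.toNat 0

-- visited[r][c] read/write on the bool matrix (guarded in-range, nonnegative indices)
def pvVGet (vis : List (List Bool)) (r c : Int) : Bool := (vis.getD r.toNat []).getD c.toNat false
def pvVSet (vis : List (List Bool)) (r c : Int) : List (List Bool) :=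
  vis.set r.toNat ((vis.getD r.toNat []).set c.toNat true)

-- the body of 'for dr, dc in [...]' inside the BFS loop: state is (queue, visited, cells)
def pvStepNbrA (grid : List (List Int)) (rows cols cr cc : Int)
    (st : List (Int × Int) × List (List Bool) × List (Int × Int)) (d : Int × Int) :
    List (Int × Int) × List (List Bool) × List (Int × Int) :=
  let nr := cr + d.1
  let nc := cc + d.2
  if 0 ≤ nr ∧ nr < rows ∧ 0 ≤ nc ∧ nc < cols ∧ ¬ pvVGet st.2.1 nr nc = true ∧ pvCell grid nr nc = 5 then
    (st.1 ++ [(nr, nc)], pvVSet st.2.1 nr nc, st.2.2 ++ [(nr, nc)])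
  else st

-- the BFS while-loop of find_rect; fuel rows*cols+1 is a termination guard only (never exhausted:
-- each iteration pops one queue entry and every cell is enqueued at most once)
def pvBfsA (grid : List (List Int)) (rows cols : Int) :
    Nat → List (Int × Int) → List (List Bool) → List (Int × Int) →
    List (List Bool) × List (Int × Int)
  | 0, _, vis, cells => (vis, cells)
  | fuel + 1, q, vis, cells =>
    match q with
    | [] => (vis, cells)
    | (cr, cc) :: q =>
      let st := [((-1 : Int), (0 : Int)), (1, 0), (0, -1), (0, 1)].foldl
        (pvStepNbrA grid rows cols cr cc) (q, vis, cells)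
      pvBfsA grid rows cols fuel st.1 st.2.1 st.2.2

-- 'for ic in range(c1+1, c2): output[ir][ic] = fill'
def pvFillRowA (fill c1 c2 : Int) (o : List (List Int)) (ir : Int) : List (List Int) :=
  (PySem.List.pyRange (c1 + 1) c2 1).foldl
    (fun o ic => PySem.List.pySetD o ir (PySem.List.pySetD (PySem.List.pyGetD o ir []) ic fill)) o

-- the body of the scan 'if grid[r][c] == 5 and not visited[r][c]: ...': state is (output, visited)
def pvBodyA (grid : List (List Int)) (rows cols : Int)
    (st : List (List Int) × List (List Bool)) (r c : Int) :
    List (List Int) × List (List Bool) :=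
  if pvCell grid r c = 5 ∧ ¬ pvVGet st.2 r c = true then
    let br := pvBfsA grid rows cols (rows.toNat * cols.toNat + 1) [(r, c)] (pvVSet st.2 r c) [(r, c)]
    let cells := br.2
    let r1 := (PySem.List.min? (cells.map (·.1)) (fun x => x)).getD 0
    let r2 := (PySem.List.max? (cells.map (·.1)) (fun x => x)).getD 0
    let c1 := (PySem.List.min? (cells.map (·.2)) (fun x => x)).getD 0
    let c2 := (PySem.List.max? (cells.map (·.2)) (fun x => x)).getD 0
    let intH := r2 - r1 - 1
    let intW := c2 - c1 - 1
    if 0 < intH ∧ 0 < intW then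
      let fill := 5 + min intH intW
      ((PySem.List.pyRange (r1 + 1) r2 1).foldl (pvFillRowA fill c1 c2) st.1, br.1)
    else (st.1, br.1)
  else st

def solve_c0f76784 (grid : List (List Int)) : List (List Int) :=
  let rows : Int := PySem.List.len grid
  let cols : Int := PySem.List.len (PySem.List.pyGetD grid 0 [])
  let output := grid.map (fun row => PySem.List.slice row none none)
  let visited : List (List Bool) := List.replicate rows.toNat (List.replicate cols.toNat false)
  let res := (PySem.List.pyRange 0 rows 1).foldl
    (fun st r => (PySem.List.pyRange 0 cols 1).foldl
      (fun st c => pvBodyA grid rows cols st r c) st)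
    (output, visited)
  res.1

-- ===== PORT B =====
-- grid[n[0]][n[1]]; B reads it only under the same in-range guards
def pvAt (grid : List (List Int)) (r c : Int) : Int := (grid.getD r.toNat []).getD c.toNat 0

-- the body of 'for n in (...)' inside the DFS loop: state is (stack, visited)
def pvStepNbrB (grid : List (List Int)) (rows cols : Int)
    (st : List (Int × Int) × PySem.Set (Int × Int)) (n : Int × Int) :
    List (Int × Int) × PySem.Set (Int × Int) :=
  if 0 ≤ n.1 ∧ n.1 < rows ∧ 0 ≤ n.2 ∧ n.2 < cols ∧ n ∉ st.2 ∧ pvAt grid n.1 n.2 = 5 then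
    (n :: st.1, PySem.Set.add st.2 n)
  else st

-- the DFS while-loop of Source B; the head of the list is the top of the Python stack (stack.pop());
-- fuel rows*cols+1 is a termination guard only (each iteration pops one entry, cells are pushed once)
def pvDfsB (grid : List (List Int)) (rows cols : Int) :
    Nat → List (Int × Int) → PySem.Set (Int × Int) → Int → Int → Int → Int →
    PySem.Set (Int × Int) × Int × Int × Int × Int
  | 0, _, vis, r1, r2, c1, c2 => (vis, r1, r2, c1, c2)
  | fuel + 1, stack, vis, r1, r2, c1, c2 =>
    match stack with
    | [] => (vis, r1, r2, c1, c2)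
    | (cr, cc) :: stack =>
      let st := [(cr - 1, cc), (cr + 1, cc), (cr, cc - 1), (cr, cc + 1)].foldl
        (pvStepNbrB grid rows cols) (stack, vis)
      pvDfsB grid rows cols fuel st.1 st.2 (min r1 cr) (max r2 cr) (min c1 cc) (max c2 cc)

-- the body of 'if grid[r][c] == 5 and (r, c) not in visited: ...': state is (visited, plan)
def pvBodyB (grid : List (List Int)) (rows cols : Int)
    (st : PySem.Set (Int × Int) × List (Int × Int × Int × Int × Int)) (r c : Int) :
    PySem.Set (Int × Int) × List (Int × Int × Int × Int × Int) :=
  if pvAt grid r c = 5 ∧ (r, c) ∉ st.1 then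
    let d := pvDfsB grid rows cols (rows.toNat * cols.toNat + 1) [(r, c)] (PySem.Set.add st.1 (r, c)) r r c c
    if 1 < d.2.2.1 - d.2.1 ∧ 1 < d.2.2.2.2 - d.2.2.2.1 then
      (d.1, st.2 ++ [(d.2.1, d.2.2.1, d.2.2.2.1, d.2.2.2.2,
                      5 + min (d.2.2.1 - d.2.1) (d.2.2.2.2 - d.2.2.2.1) - 1)])
    else (d.1, st.2)
  else st

-- does plan entry e = (r1, r2, c1, c2, color) strictly cover cell (i, j)?
def pvCovers (e : Int × Int × Int × Int × Int) (i j : Int) : Bool :=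
  decide (e.1 < i ∧ i < e.2.1 ∧ e.2.2.1 < j ∧ j < e.2.2.2.1)

-- the final comprehension: each cell takes the colour of the last planned box covering it
def pvRenderB (grid : List (List Int)) (plan : List (Int × Int × Int × Int × Int)) :
    List (List Int) :=
  (PySem.List.enumerate grid 0).map (fun p =>
    (PySem.List.enumerate p.2 0).map (fun q =>
      match plan.reverse.find? (fun e => pvCovers e p.1 q.1) with
      | some e => e.2.2.2.2
      | none => q.2))

def solve_c0f76784_alt (grid : List (List Int)) : List (List Int) :=
  let rows : Int := PySem.List.len grid
  let cols : Int := PySem.List.len (PySem.List.pyGetD grid 0 [])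
  let st := (PySem.List.pyRange 0 (rows * cols) 1).foldl
    (fun st idx => pvBodyB grid rows cols st (PySem.Int.floordiv idx cols) (PySem.Int.mod idx cols))
    (PySem.Set.empty, [])
  pvRenderB grid st.2

-- ===== PRECONDITION & SPEC =====
-- Pre_ excludes exactly the inputs where A raises IndexError: the empty grid (grid[0]) and grids with
-- a row shorter than row 0 (the scan reads grid[r][c] for every c < len(grid[0])).
def Pre_solve_c0f76784 (grid : List (List Int)) : Prop :=
  grid ≠ [] ∧ ∀ row ∈ grid, (grid.headD []).length ≤ row.length
instance (grid : List (List Int)) : Decidable (Pre_solve_c0f76784 grid) := by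
  unfold Pre_solve_c0f76784; infer_instance

def pvWitness_solve_c0f76784 : List (List Int) := [[5,5,5],[5,0,5],[5,5,5]]

def Spec_solve_c0f76784 (grid : List (List Int)) (out : List (List Int)) : Prop := out = solve_c0f76784_alt grid
instance (grid : List (List Int)) (out : List (List Int)) : Decidable (Spec_solve_c0f76784 grid out) := by
  unfold Spec_solve_c0f76784; infer_instance

-- ===== CLAIM (what is proved, stated in full; the proofs are below) =====
def Claim_equal_solve_c0f76784 : Prop := ∀ (grid : List (List Int)), Dom_solve_c0f76784 grid → Pre_solve_c0f76784 grid → Spec_solve_c0f76784 grid (solve_c0f76784 grid)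

-- ===== LEMMAS AND PROOFS =====

-- ===== proof section 1: reachability basics =====
def pvInR (grid : List (List Int)) (p : Int × Int) : Prop :=
  0 ≤ p.1 ∧ p.1 < (grid.length : Int) ∧ 0 ≤ p.2 ∧ p.2 < ((grid.headD []).length : Int)

def pvGood (grid : List (List Int)) (p : Int × Int) : Prop :=
  pvInR grid p ∧ pvCell grid p.1 p.2 = 5

def pvAdj (p q : Int × Int) : Prop :=
  (q.1 = p.1 - 1 ∧ q.2 = p.2) ∨ (q.1 = p.1 + 1 ∧ q.2 = p.2) ∨
  (q.1 = p.1 ∧ q.2 = p.2 - 1) ∨ (q.1 = p.1 ∧ q.2 = p.2 + 1)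

def pvStep (grid : List (List Int)) (p q : Int × Int) : Prop :=
  pvGood grid p ∧ pvGood grid q ∧ pvAdj p q

def pvReach (grid : List (List Int)) (s p : Int × Int) : Prop :=
  Relation.ReflTransGen (pvStep grid) s p

lemma pvStep_symm {grid : List (List Int)} {p q : Int × Int} (h : pvStep grid p q) :
    pvStep grid q p := by
  obtain ⟨hp, hq, hadj⟩ := h
  refine ⟨hq, hp, ?_⟩
  unfold pvAdj at hadj ⊢
  omega

lemma pvReach_symm {grid : List (List Int)} {p q : Int × Int} (h : pvReach grid p q) :
    pvReach grid q p :=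
  Relation.ReflTransGen.symmetric (fun _ _ hs => pvStep_symm hs) h

lemma pvReach_good {grid : List (List Int)} {s p : Int × Int} (hs : pvGood grid s)
    (h : pvReach grid s p) : pvGood grid p := by
  induction h with
  | refl => exact hs
  | tail _ hstep _ => exact hstep.2.1

def pvClosed (grid : List (List Int)) (S : List (Int × Int)) : Prop :=
  ∀ p ∈ S, ∀ q, pvStep grid p q → q ∈ S

lemma pvMem_of_reach {grid : List (List Int)} {S : List (Int × Int)} {s p : Int × Int}
    (hc : pvClosed grid S) (hs : s ∈ S) (h : pvReach grid s p) : p ∈ S := by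
  induction h with
  | refl => exact hs
  | tail _ hstep ih => exact hc _ ih _ hstep

lemma pvNotMem_comp {grid : List (List Int)} {S : List (Int × Int)} {s p : Int × Int}
    (hc : pvClosed grid S) (hs : s ∉ S) (h : pvReach grid s p) : p ∉ S := by
  intro hp
  exact hs (pvMem_of_reach hc hp (pvReach_symm h))

-- a Nodup list of in-range cells has at most rows*cols elements
lemma pvCard_le {grid : List (List Int)} (P : List (Int × Int)) (hnd : P.Nodup)
    (hin : ∀ p ∈ P, pvInR grid p) :
    P.length ≤ grid.length * (grid.headD []).length := by
  classical
  set C := (grid.headD []).length with hC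
  let enc : Int × Int → Nat × Nat := fun p => (p.1.toNat, p.2.toNat)
  have hmapnd : (P.map enc).Nodup := by
    refine hnd.map_on ?_
    intro p hp q hq heq
    have hip := hin p hp
    have hiq := hin q hq
    unfold pvInR at hip hiq
    simp only [enc, Prod.mk.injEq] at heq
    exact Prod.ext (by omega) (by omega)
  have hsub : (P.map enc).toFinset ⊆ (Finset.range grid.length) ×ˢ (Finset.range C) := by
    intro n hn
    simp only [List.mem_toFinset, List.mem_map] at hn
    obtain ⟨p, hp, rfl⟩ := hn
    have := hin p hp
    unfold pvInR at this
    simp only [Finset.mem_product, Finset.mem_range, enc]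
    omega
  have hcard := Finset.card_le_card hsub
  rw [Finset.card_product, Finset.card_range, Finset.card_range,
    List.toFinset_card_of_nodup hmapnd, List.length_map] at hcard
  exact hcard

-- ===== proof section 2: visited-matrix abstraction =====
def pvVisInv (grid : List (List Int)) (vis : List (List Bool)) (S : List (Int × Int)) : Prop :=
  vis.length = grid.length ∧ (∀ row ∈ vis, row.length = (grid.headD []).length) ∧
  (∀ p : Int × Int, pvInR grid p → (pvVGet vis p.1 p.2 = true ↔ p ∈ S))

lemma pvVisInv_init (grid : List (List Int)) :
    pvVisInv grid (List.replicate grid.length (List.replicate (grid.headD []).length false)) [] := by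
  refine ⟨by simp, ?_, ?_⟩
  · intro row hrow
    simp only [List.eq_of_mem_replicate hrow, List.length_replicate]
  · intro p hp
    simp only [List.not_mem_nil, iff_false]
    unfold pvVGet
    unfold pvInR at hp
    have h1 : p.1.toNat < grid.length := by omega
    rw [List.getD_eq_getElem?_getD (l := List.replicate grid.length (List.replicate (grid.headD []).length false)),
      List.getElem?_replicate]
    simp only [h1, if_pos, Option.getD_some, List.getD_eq_getElem?_getD, List.getElem?_replicate]
    split <;> simp

lemma pvVisInv_congr {grid : List (List Int)} {vis : List (List Bool)}
    {S T : List (Int × Int)} (hST : ∀ p, p ∈ S ↔ p ∈ T) (h : pvVisInv grid vis S) :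
    pvVisInv grid vis T :=
  ⟨h.1, h.2.1, fun p hp => (h.2.2 p hp).trans (hST p)⟩

lemma pvVisInv_set {grid : List (List Int)} {vis : List (List Bool)} {S : List (Int × Int)}
    {p : Int × Int} (h : pvVisInv grid vis S) (hp : pvInR grid p) :
    pvVisInv grid (pvVSet vis p.1 p.2) (S ++ [p]) := by
  obtain ⟨hlen, hrows, hmem⟩ := h
  have hp' := hp
  unfold pvInR at hp'
  have hplt : p.1.toNat < vis.length := by omega
  have hmemrow : vis.getD p.1.toNat [] ∈ vis := by
    rw [List.getD_eq_getElem?_getD, List.getElem?_eq_getElem hplt]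
    exact Option.getD_some ▸ List.getElem_mem hplt
  have hrowlen : (vis.getD p.1.toNat []).length = (grid.headD []).length := hrows _ hmemrow
  refine ⟨by simp [pvVSet, hlen], ?_, ?_⟩
  · intro row hrow
    rcases List.mem_or_eq_of_mem_set hrow with h1 | h1
    · exact hrows row h1
    · subst h1
      rw [List.length_set]
      exact hrowlen
  · intro q hq
    have hq' := hq
    unfold pvInR at hq'
    unfold pvVGet pvVSet
    by_cases hr : q.1.toNat = p.1.toNat
    · rw [List.getD_eq_getElem?_getD (l := vis.set _ _), hr, List.getElem?_set_self hplt]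
      simp only [Option.getD_some]
      by_cases hc : q.2.toNat = p.2.toNat
      · have hqp : q = p := Prod.ext (by omega) (by omega)
        subst hqp
        rw [List.getD_eq_getElem?_getD, List.getElem?_set_self (by omega)]
        simp
      · have hne : q ≠ p := fun hqp => hc (by rw [hqp])
        rw [List.getD_eq_getElem?_getD, List.getElem?_set_ne (fun hx => hc hx.symm)]
        have := hmem q hq
        unfold pvVGet at this
        rw [List.getD_eq_getElem?_getD, hr, List.getD_eq_getElem?_getD] at this
        rw [List.getD_eq_getElem?_getD (l := vis), this]
        simp [hne]
    · rw [List.getD_eq_getElem?_getD (l := vis.set _ _), List.getElem?_set_ne (fun hx => hr hx.symm),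
        ← List.getD_eq_getElem?_getD]
      have hne : q ≠ p := fun hqp => hr (by rw [hqp])
      have := hmem q hq
      unfold pvVGet at this
      rw [this]
      simp [hne]
-- ===== proof section 3: the four-neighbour folds add exactly the fresh good neighbours =====
lemma pvFoldNbrB {grid : List (List Int)} {rows cols : Int}
    (hrows : rows = (grid.length : Int)) (hcols : cols = ((grid.headD []).length : Int)) :
    ∀ (ds stack vis : List (Int × Int)), ds.Nodup →
    ∃ added,
      ds.foldl (pvStepNbrB grid rows cols) (stack, vis) = (added.reverse ++ stack, vis ++ added) ∧
      (∀ n, n ∈ added ↔ n ∈ ds ∧ pvGood grid n ∧ n ∉ vis) ∧ added.Nodup := by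
  intro ds
  induction ds with
  | nil => intro stack vis _; exact ⟨[], by simp, by simp, List.nodup_nil⟩
  | cons d ds ih =>
    intro stack vis hnd
    have hdne : d ∉ ds := (List.nodup_cons.mp hnd).1
    have hnd' : ds.Nodup := (List.nodup_cons.mp hnd).2
    by_cases hcond : pvGood grid d ∧ d ∉ vis
    · have hstep : pvStepNbrB grid rows cols (stack, vis) d = (d :: stack, vis ++ [d]) := by
        have : (0 ≤ d.1 ∧ d.1 < rows ∧ 0 ≤ d.2 ∧ d.2 < cols ∧ d ∉ vis ∧ pvAt grid d.1 d.2 = 5) := by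
          obtain ⟨⟨hin, hc5⟩, hnv⟩ := hcond
          unfold pvInR at hin
          exact ⟨hin.1, hrows ▸ hin.2.1, hin.2.2.1, hcols ▸ hin.2.2.2, hnv, hc5⟩
        simp only [pvStepNbrB, if_pos this]
        rw [PySem.Set.add_of_not_mem hcond.2]
      obtain ⟨added, heq, hmem, hndadd⟩ := ih (d :: stack) (vis ++ [d]) hnd'
      refine ⟨d :: added, ?_, ?_, ?_⟩
      · simp only [List.foldl_cons, hstep, heq, List.reverse_cons, List.append_assoc,
          List.singleton_append, List.append_assoc]
      · intro n
        simp only [List.mem_cons, hmem n]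
        constructor
        · intro h
          rcases h with h | ⟨hn, hg, hnv⟩
          · subst h; exact ⟨Or.inl rfl, hcond.1, hcond.2⟩
          · have hne : n ≠ d := fun he => hdne (he ▸ hn)
            exact ⟨Or.inr hn, hg, fun hv => hnv (by simp [List.mem_append, hv])⟩
        · rintro ⟨hn, hg, hnv⟩
          rcases hn with h | h
          · exact Or.inl h
          · have hne : n ≠ d := fun he => hdne (he ▸ h)
            exact Or.inr ⟨h, hg, by simp [hne, hnv]⟩
      · refine List.nodup_cons.mpr ⟨fun hd => ?_, hndadd⟩
        exact hdne ((hmem d).mp hd).1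
    · have hstep : pvStepNbrB grid rows cols (stack, vis) d = (stack, vis) := by
        simp only [pvStepNbrB]
        rw [if_neg]
        intro ⟨h1, h2, h3, h4, h5, h6⟩
        exact hcond ⟨⟨⟨h1, hrows ▸ h2, h3, hcols ▸ h4⟩, h6⟩, h5⟩
      obtain ⟨added, heq, hmem, hndadd⟩ := ih stack vis hnd'
      refine ⟨added, by simp only [List.foldl_cons, hstep, heq], ?_, hndadd⟩
      intro n
      rw [hmem n]
      constructor
      · rintro ⟨hn, hg, hnv⟩; exact ⟨List.mem_cons_of_mem _ hn, hg, hnv⟩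
      · rintro ⟨hn, hg, hnv⟩
        rcases List.mem_cons.mp hn with h | h
        · exact absurd ⟨h ▸ hg, h ▸ hnv⟩ hcond
        · exact ⟨h, hg, hnv⟩

lemma pvFoldNbrA {grid : List (List Int)} {rows cols : Int}
    (hrows : rows = (grid.length : Int)) (hcols : cols = ((grid.headD []).length : Int))
    (cr cc : Int) :
    ∀ (ds : List (Int × Int)) (q : List (Int × Int)) (vis : List (List Bool))
      (cells S : List (Int × Int)), pvVisInv grid vis S →
    (ds.map (fun d => (cr + d.1, cc + d.2))).Nodup →
    ∃ added vis',
      ds.foldl (pvStepNbrA grid rows cols cr cc) (q, vis, cells) = (q ++ added, vis', cells ++ added) ∧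
      pvVisInv grid vis' (S ++ added) ∧
      (∀ n, n ∈ added ↔ n ∈ ds.map (fun d => (cr + d.1, cc + d.2)) ∧ pvGood grid n ∧ n ∉ S) ∧
      added.Nodup := by
  intro ds
  induction ds with
  | nil => intro q vis cells S hinv _; exact ⟨[], vis, by simp, by simpa using hinv, by simp, List.nodup_nil⟩
  | cons d ds ih =>
    intro q vis cells S hinv hnd
    simp only [List.map_cons, List.nodup_cons] at hnd
    obtain ⟨hdne, hnd'⟩ := hnd
    set n0 : Int × Int := (cr + d.1, cc + d.2) with hn0
    by_cases hcond : pvGood grid n0 ∧ n0 ∉ S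
    · have hstep : pvStepNbrA grid rows cols cr cc (q, vis, cells) d =
          (q ++ [n0], pvVSet vis n0.1 n0.2, cells ++ [n0]) := by
        have hc : (0 ≤ cr + d.1 ∧ cr + d.1 < rows ∧ 0 ≤ cc + d.2 ∧ cc + d.2 < cols ∧
            ¬ pvVGet vis (cr + d.1) (cc + d.2) = true ∧ pvCell grid (cr + d.1) (cc + d.2) = 5) := by
          obtain ⟨⟨hin, hc5⟩, hnv⟩ := hcond
          unfold pvInR at hin
          refine ⟨hin.1, hrows ▸ hin.2.1, hin.2.2.1, hcols ▸ hin.2.2.2, ?_, hc5⟩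
          intro hv
          exact hnv ((hinv.2.2 n0 ⟨hin.1, hin.2.1, hin.2.2.1, hin.2.2.2⟩).mp hv)
        simp only [pvStepNbrA, if_pos hc]
        rfl
      have hinv' : pvVisInv grid (pvVSet vis n0.1 n0.2) (S ++ [n0]) :=
        pvVisInv_set hinv hcond.1.1
      obtain ⟨added, vis', heq, hinv'', hmem, hndadd⟩ :=
        ih (q ++ [n0]) (pvVSet vis n0.1 n0.2) (cells ++ [n0]) (S ++ [n0]) hinv' hnd'
      refine ⟨n0 :: added, vis', ?_, ?_, ?_, ?_⟩
      · simp only [List.foldl_cons, hstep, heq, List.append_assoc, List.singleton_append]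
      · refine pvVisInv_congr (fun p => ?_) hinv''
        simp [List.mem_append, List.mem_cons]
      · intro n
        simp only [List.map_cons, List.mem_cons, hmem n, ← hn0]
        constructor
        · intro h
          rcases h with h | ⟨hn, hg, hnv⟩
          · subst h; exact ⟨Or.inl rfl, hcond.1, hcond.2⟩
          · have hne : n ≠ n0 := fun he => hdne (he ▸ hn)
            exact ⟨Or.inr hn, hg, fun hv => hnv (by simp [List.mem_append, hv])⟩
        · rintro ⟨hn, hg, hnv⟩
          rcases hn with h | h
          · exact Or.inl h
          · have hne : n ≠ n0 := fun he => hdne (he ▸ h)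
            exact Or.inr ⟨h, hg, by simp [hne, hnv]⟩
      · refine List.nodup_cons.mpr ⟨fun hd => ?_, hndadd⟩
        exact hdne ((hmem n0).mp hd).1
    · have hstep : pvStepNbrA grid rows cols cr cc (q, vis, cells) d = (q, vis, cells) := by
        simp only [pvStepNbrA]
        rw [if_neg]
        intro ⟨h1, h2, h3, h4, h5, h6⟩
        have hin : pvInR grid n0 := ⟨h1, hrows ▸ h2, h3, hcols ▸ h4⟩
        exact hcond ⟨⟨hin, h6⟩, fun hS => h5 ((hinv.2.2 n0 hin).mpr hS)⟩
      obtain ⟨added, vis', heq, hinv'', hmem, hndadd⟩ := ih q vis cells S hinv hnd'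
      refine ⟨added, vis', by simp only [List.foldl_cons, hstep, heq], hinv'', ?_, hndadd⟩
      intro n
      simp only [List.map_cons, List.mem_cons, hmem n, ← hn0]
      constructor
      · rintro ⟨hn, hg, hnv⟩; exact ⟨Or.inr hn, hg, hnv⟩
      · rintro ⟨hn, hg, hnv⟩
        rcases hn with h | h
        · exact absurd ⟨h ▸ hg, h ▸ hnv⟩ hcond
        · exact ⟨h, hg, hnv⟩
lemma pvAdjA_iff (cr cc : Int) (n : Int × Int) :
    n ∈ ([((-1 : Int), (0 : Int)), (1, 0), (0, -1), (0, 1)].map (fun d => (cr + d.1, cc + d.2))) ↔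
      pvAdj (cr, cc) n := by
  simp only [List.map_cons, List.map_nil, List.mem_cons, List.not_mem_nil, or_false,
    pvAdj, Prod.ext_iff]
  constructor
  · rintro (h | h | h | h) <;> [skip; skip; skip; skip] <;> (obtain ⟨h1, h2⟩ := h) <;> omega
  · intro h; omega
lemma pvAdjB_iff (cr cc : Int) (n : Int × Int) :
    n ∈ ([(cr - 1, cc), (cr + 1, cc), (cr, cc - 1), (cr, cc + 1)] : List (Int × Int)) ↔
      pvAdj (cr, cc) n := by
  simp only [List.mem_cons, List.not_mem_nil, or_false, pvAdj, Prod.ext_iff]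
lemma pvNbrsA_nodup (cr cc : Int) :
    (([((-1 : Int), (0 : Int)), (1, 0), (0, -1), (0, 1)]).map
      (fun d => (cr + d.1, cc + d.2))).Nodup := by
  simp only [List.map_cons, List.map_nil, List.nodup_cons, List.mem_cons, List.not_mem_nil,
    or_false, List.nodup_nil, and_true, Prod.mk.injEq, not_or, true_and, and_true,
    not_false_eq_true]
  omega
lemma pvNbrsB_nodup (cr cc : Int) :
    ([(cr - 1, cc), (cr + 1, cc), (cr, cc - 1), (cr, cc + 1)] : List (Int × Int)).Nodup := by
  simp only [List.nodup_cons, List.mem_cons, List.not_mem_nil, or_false, List.nodup_nil,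
    and_true, Prod.mk.injEq, not_or, true_and, not_false_eq_true]
  omega

lemma pvBfsA_spec {grid : List (List Int)} {rows cols : Int}
    (hrows : rows = (grid.length : Int)) (hcols : cols = ((grid.headD []).length : Int))
    {start : Int × Int} (hstart : pvGood grid start)
    {S0 : List (Int × Int)} (hdisj : ∀ p, pvReach grid start p → p ∉ S0) :
    ∀ (fuel : Nat) (q : List (Int × Int)) (vis : List (List Bool)) (cells S P : List (Int × Int)),
    pvVisInv grid vis S →
    (∀ p, p ∈ S ↔ p ∈ S0 ∨ p ∈ q ∨ p ∈ P) →
    (∀ p ∈ q, pvReach grid start p) → (∀ p ∈ P, pvReach grid start p) →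
    q.Nodup → P.Nodup → (∀ p ∈ q, p ∉ P) →
    (∀ p ∈ P, ∀ t, pvStep grid p t → t ∈ S) →
    (∀ p, p ∈ cells ↔ p ∈ q ∨ p ∈ P) →
    start ∈ S →
    fuel + P.length = grid.length * (grid.headD []).length + 1 →
    ∃ S', pvVisInv grid (pvBfsA grid rows cols fuel q vis cells).1 S' ∧
      (∀ p, p ∈ S' ↔ p ∈ S0 ∨ pvReach grid start p) ∧
      (∀ p, p ∈ (pvBfsA grid rows cols fuel q vis cells).2 ↔ pvReach grid start p) := by
  intro fuel
  induction fuel with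
  | zero =>
    intro q vis cells S P _ _ _ hPreach _ hPnd _ _ _ _ hfuel
    exfalso
    have := pvCard_le P hPnd (fun p hp => (pvReach_good hstart (hPreach p hp)).1)
    omega
  | succ fuel ih =>
    intro q vis cells S P hinv hS hqreach hPreach hqnd hPnd hqP hclosed hcells hstartS hfuel
    match q with
    | [] =>
      have hstartP : start ∈ P := by
        rcases (hS start).mp hstartS with h | h | h
        · exact absurd h (hdisj start Relation.ReflTransGen.refl)
        · exact absurd h (List.not_mem_nil)
        · exact h
      have hPmem : ∀ p, pvReach grid start p ↔ p ∈ P := by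
        intro p
        constructor
        · intro hr
          induction hr with
          | refl => exact hstartP
          | @tail b t hr hstep ihr =>
            rcases (hS t).mp (hclosed b ihr t hstep) with h | h | h
            · exact absurd h (hdisj t (hr.tail hstep))
            · exact absurd h (List.not_mem_nil)
            · exact h
        · exact hPreach p
      refine ⟨S, ?_, ?_, ?_⟩
      · simpa only [pvBfsA] using hinv
      · intro p
        rw [hS p, ← hPmem p]
        simp only [List.not_mem_nil, false_or]
      · intro p
        simp only [pvBfsA]
        rw [hcells p, ← hPmem p]
        simp only [List.not_mem_nil, false_or]
    | (cr, cc) :: q' =>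
      obtain ⟨added, vis', heq, hinv', hmemadd, hndadd⟩ :=
        pvFoldNbrA hrows hcols cr cc [((-1 : Int), (0 : Int)), (1, 0), (0, -1), (0, 1)]
          q' vis cells S hinv (pvNbrsA_nodup cr cc)
      have hxq : (cr, cc) ∈ ((cr, cc) :: q' : List (Int × Int)) := List.mem_cons_self ..
      have hxreach : pvReach grid start (cr, cc) := hqreach _ hxq
      have hxgood : pvGood grid (cr, cc) := pvReach_good hstart hxreach
      have hxS : (cr, cc) ∈ S := (hS _).mpr (Or.inr (Or.inl hxq))
      have hxnq' : (cr, cc) ∉ q' := (List.nodup_cons.mp hqnd).1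
      have haddmem : ∀ n ∈ added, pvAdj (cr, cc) n ∧ pvGood grid n ∧ n ∉ S := by
        intro n hn
        obtain ⟨hmap, hg, hnS⟩ := (hmemadd n).mp hn
        exact ⟨(pvAdjA_iff cr cc n).mp hmap, hg, hnS⟩
      have haddreach : ∀ n ∈ added, pvReach grid start n := by
        intro n hn
        obtain ⟨hadj, hg, _⟩ := haddmem n hn
        exact hxreach.tail ⟨hxgood, hg, hadj⟩
      have hrw : pvBfsA grid rows cols (fuel + 1) ((cr, cc) :: q') vis cells =
          pvBfsA grid rows cols fuel (q' ++ added) vis' (cells ++ added) := by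
        simp only [pvBfsA]
        rw [heq]
      rw [hrw]
      refine ih (q' ++ added) vis' (cells ++ added) (S ++ added) (P ++ [(cr, cc)])
        hinv' ?_ ?_ ?_ ?_ ?_ ?_ ?_ ?_ ?_ ?_
      · intro p
        have h1 := hS p
        simp only [List.mem_append, List.mem_cons] at h1 ⊢
        by_cases hpx : p = (cr, cc) <;> tauto
      · intro p hp
        rcases List.mem_append.mp hp with h | h
        · exact hqreach _ (List.mem_cons_of_mem _ h)
        · exact haddreach _ h
      · intro p hp
        rcases List.mem_append.mp hp with h | h
        · exact hPreach _ h
        · rw [List.mem_singleton.mp h]; exact hxreach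
      · rw [List.nodup_append]
        refine ⟨(List.nodup_cons.mp hqnd).2, hndadd, ?_⟩
        intro a ha b hb heq
        exact (haddmem b hb).2.2
          ((hS b).mpr (Or.inr (Or.inl (List.mem_cons_of_mem _ (heq ▸ ha)))))
      · rw [List.nodup_append]
        refine ⟨hPnd, List.nodup_singleton _, ?_⟩
        intro a ha b hb heq
        rw [List.mem_singleton.mp hb] at heq
        exact hqP _ hxq (heq ▸ ha)
      · intro p hp hpP
        rcases List.mem_append.mp hpP with h | h
        · rcases List.mem_append.mp hp with h' | h'
          · exact hqP _ (List.mem_cons_of_mem _ h') h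
          · exact (haddmem p h').2.2 ((hS p).mpr (Or.inr (Or.inr h)))
        · have hpx : p = (cr, cc) := List.mem_singleton.mp h
          rcases List.mem_append.mp hp with h' | h'
          · exact hxnq' (hpx ▸ h')
          · exact (haddmem p h').2.2 (hpx ▸ hxS)
      · intro p hp t hstep
        simp only [List.mem_append]
        rcases List.mem_append.mp hp with h | h
        · exact Or.inl (hclosed p h t hstep)
        · have hpx : p = (cr, cc) := List.mem_singleton.mp h
          subst hpx
          by_cases htS : t ∈ S
          · exact Or.inl htS
          · refine Or.inr ((hmemadd t).mpr ⟨?_, hstep.2.1, htS⟩)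
            exact (pvAdjA_iff cr cc t).mpr hstep.2.2
      · intro p
        have h1 := hcells p
        simp only [List.mem_append, List.mem_cons, List.not_mem_nil,
          or_false] at h1 ⊢
        constructor
        · rintro (hc | hadd2)
          · rcases h1.mp hc with (h | h) | h
            · exact Or.inr (Or.inr h)
            · exact Or.inl (Or.inl h)
            · exact Or.inr (Or.inl h)
          · exact Or.inl (Or.inr hadd2)
        · rintro ((h | h) | (h | h))
          · exact Or.inl (h1.mpr (Or.inl (Or.inr h)))
          · exact Or.inr h
          · exact Or.inl (h1.mpr (Or.inr h))
          · exact Or.inl (h1.mpr (Or.inl (Or.inl h)))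
      · exact List.mem_append.mpr (Or.inl hstartS)
      · simp only [List.length_append, List.length_singleton]
        omega

lemma pvDfsB_spec {grid : List (List Int)} {rows cols : Int}
    (hrows : rows = (grid.length : Int)) (hcols : cols = ((grid.headD []).length : Int))
    {start : Int × Int} (hstart : pvGood grid start)
    {S0 : List (Int × Int)} (hdisj : ∀ p, pvReach grid start p → p ∉ S0) :
    ∀ (fuel : Nat) (stack vis P : List (Int × Int)) (r1 r2 c1 c2 : Int),
    (∀ p, p ∈ vis ↔ p ∈ S0 ∨ p ∈ stack ∨ p ∈ P) →
    vis.Nodup →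
    (∀ p ∈ stack, pvReach grid start p) → (∀ p ∈ P, pvReach grid start p) →
    stack.Nodup → P.Nodup → (∀ p ∈ stack, p ∉ P) →
    (∀ p ∈ P, ∀ t, pvStep grid p t → t ∈ vis) →
    start ∈ vis →
    (∀ p ∈ start :: P, r1 ≤ p.1 ∧ p.1 ≤ r2 ∧ c1 ≤ p.2 ∧ p.2 ≤ c2) →
    (∃ p ∈ start :: P, p.1 = r1) → (∃ p ∈ start :: P, p.1 = r2) →
    (∃ p ∈ start :: P, p.2 = c1) → (∃ p ∈ start :: P, p.2 = c2) →
    fuel + P.length = grid.length * (grid.headD []).length + 1 →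
    (∀ p, p ∈ (pvDfsB grid rows cols fuel stack vis r1 r2 c1 c2).1 ↔
        p ∈ S0 ∨ pvReach grid start p) ∧
    (pvDfsB grid rows cols fuel stack vis r1 r2 c1 c2).1.Nodup ∧
    (∀ p, pvReach grid start p →
        (pvDfsB grid rows cols fuel stack vis r1 r2 c1 c2).2.1 ≤ p.1 ∧
        p.1 ≤ (pvDfsB grid rows cols fuel stack vis r1 r2 c1 c2).2.2.1 ∧
        (pvDfsB grid rows cols fuel stack vis r1 r2 c1 c2).2.2.2.1 ≤ p.2 ∧
        p.2 ≤ (pvDfsB grid rows cols fuel stack vis r1 r2 c1 c2).2.2.2.2) ∧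
    (∃ p, pvReach grid start p ∧ p.1 = (pvDfsB grid rows cols fuel stack vis r1 r2 c1 c2).2.1) ∧
    (∃ p, pvReach grid start p ∧ p.1 = (pvDfsB grid rows cols fuel stack vis r1 r2 c1 c2).2.2.1) ∧
    (∃ p, pvReach grid start p ∧ p.2 = (pvDfsB grid rows cols fuel stack vis r1 r2 c1 c2).2.2.2.1) ∧
    (∃ p, pvReach grid start p ∧ p.2 = (pvDfsB grid rows cols fuel stack vis r1 r2 c1 c2).2.2.2.2) := by
  intro fuel
  induction fuel with
  | zero =>
    intro stack vis P r1 r2 c1 c2 _ _ _ hPreach _ hPnd _ _ _ _ _ _ _ _ hfuel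
    exfalso
    have := pvCard_le P hPnd (fun p hp => (pvReach_good hstart (hPreach p hp)).1)
    omega
  | succ fuel ih =>
    intro stack vis P r1 r2 c1 c2 hvis hvisnd hsreach hPreach hsnd hPnd hsP hclosed hstartv
      hbb hat1 hat2 hat3 hat4 hfuel
    match stack with
    | [] =>
      have hstartP : start ∈ P := by
        rcases (hvis start).mp hstartv with h | h | h
        · exact absurd h (hdisj start Relation.ReflTransGen.refl)
        · exact absurd h (List.not_mem_nil)
        · exact h
      have hPmem : ∀ p, pvReach grid start p ↔ p ∈ P := by
        intro p
        constructor
        · intro hr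
          induction hr with
          | refl => exact hstartP
          | @tail b t hr hstep ihr =>
            rcases (hvis t).mp (hclosed b ihr t hstep) with h | h | h
            · exact absurd h (hdisj t (hr.tail hstep))
            · exact absurd h (List.not_mem_nil)
            · exact h
        · exact hPreach p
      simp only [pvDfsB]
      refine ⟨?_, hvisnd, ?_, ?_, ?_, ?_, ?_⟩
      · intro p
        rw [hvis p, ← hPmem p]
        simp only [List.not_mem_nil, false_or]
      · intro p hp
        exact hbb p (List.mem_cons_of_mem _ ((hPmem p).mp hp))
      · obtain ⟨p, hp, he⟩ := hat1
        refine ⟨p, ?_, he⟩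
        rcases List.mem_cons.mp hp with h | h
        · exact h ▸ Relation.ReflTransGen.refl
        · exact hPreach p h
      · obtain ⟨p, hp, he⟩ := hat2
        refine ⟨p, ?_, he⟩
        rcases List.mem_cons.mp hp with h | h
        · exact h ▸ Relation.ReflTransGen.refl
        · exact hPreach p h
      · obtain ⟨p, hp, he⟩ := hat3
        refine ⟨p, ?_, he⟩
        rcases List.mem_cons.mp hp with h | h
        · exact h ▸ Relation.ReflTransGen.refl
        · exact hPreach p h
      · obtain ⟨p, hp, he⟩ := hat4
        refine ⟨p, ?_, he⟩
        rcases List.mem_cons.mp hp with h | h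
        · exact h ▸ Relation.ReflTransGen.refl
        · exact hPreach p h
    | (cr, cc) :: stack' =>
      obtain ⟨added, heq, hmemadd', hndadd⟩ :=
        pvFoldNbrB hrows hcols [(cr - 1, cc), (cr + 1, cc), (cr, cc - 1), (cr, cc + 1)]
          stack' vis (pvNbrsB_nodup cr cc)
      have hxs : (cr, cc) ∈ ((cr, cc) :: stack' : List (Int × Int)) := List.mem_cons_self ..
      have hxreach : pvReach grid start (cr, cc) := hsreach _ hxs
      have hxgood : pvGood grid (cr, cc) := pvReach_good hstart hxreach
      have hxv : (cr, cc) ∈ vis := (hvis _).mpr (Or.inr (Or.inl hxs))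
      have hxns' : (cr, cc) ∉ stack' := (List.nodup_cons.mp hsnd).1
      have haddmem : ∀ n ∈ added, pvAdj (cr, cc) n ∧ pvGood grid n ∧ n ∉ vis := by
        intro n hn
        obtain ⟨hmap, hg, hnv⟩ := (hmemadd' n).mp hn
        exact ⟨(pvAdjB_iff cr cc n).mp hmap, hg, hnv⟩
      have haddreach : ∀ n ∈ added, pvReach grid start n := by
        intro n hn
        obtain ⟨hadj, hg, _⟩ := haddmem n hn
        exact hxreach.tail ⟨hxgood, hg, hadj⟩
      have hrw : pvDfsB grid rows cols (fuel + 1) ((cr, cc) :: stack') vis r1 r2 c1 c2 =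
          pvDfsB grid rows cols fuel (added.reverse ++ stack') (vis ++ added)
            (min r1 cr) (max r2 cr) (min c1 cc) (max c2 cc) := by
        simp only [pvDfsB]
        rw [heq]
      rw [hrw]
      refine ih (added.reverse ++ stack') (vis ++ added) (P ++ [(cr, cc)])
        (min r1 cr) (max r2 cr) (min c1 cc) (max c2 cc)
        ?_ ?_ ?_ ?_ ?_ ?_ ?_ ?_ ?_ ?_ ?_ ?_ ?_ ?_ ?_
      · intro p
        have h1 := hvis p
        simp only [List.mem_append, List.mem_cons, List.mem_reverse,
          List.not_mem_nil, or_false] at h1 ⊢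
        constructor
        · rintro (hv | ha)
          · rcases h1.mp hv with h | (h | h) | h
            · exact Or.inl h
            · exact Or.inr (Or.inr (Or.inr h))
            · exact Or.inr (Or.inl (Or.inr h))
            · exact Or.inr (Or.inr (Or.inl h))
          · exact Or.inr (Or.inl (Or.inl ha))
        · rintro (h | (h | h) | (h | h))
          · exact Or.inl (h1.mpr (Or.inl h))
          · exact Or.inr h
          · exact Or.inl (h1.mpr (Or.inr (Or.inl (Or.inr h))))
          · exact Or.inl (h1.mpr (Or.inr (Or.inr h)))
          · exact Or.inl (h1.mpr (Or.inr (Or.inl (Or.inl h))))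
      · rw [List.nodup_append]
        refine ⟨hvisnd, hndadd, ?_⟩
        intro a ha b hb heqab
        exact (haddmem b hb).2.2 (heqab ▸ ha)
      · intro p hp
        rcases List.mem_append.mp hp with h | h
        · exact haddreach _ (List.mem_reverse.mp h)
        · exact hsreach _ (List.mem_cons_of_mem _ h)
      · intro p hp
        rcases List.mem_append.mp hp with h | h
        · exact hPreach _ h
        · rw [List.mem_singleton.mp h]; exact hxreach
      · rw [List.nodup_append]
        refine ⟨(List.nodup_reverse.mpr hndadd), (List.nodup_cons.mp hsnd).2, ?_⟩
        intro a ha b hb heqab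
        exact (haddmem a (List.mem_reverse.mp ha)).2.2
          (heqab ▸ ((hvis b).mpr (Or.inr (Or.inl (List.mem_cons_of_mem _ hb)))))
      · rw [List.nodup_append]
        refine ⟨hPnd, List.nodup_singleton _, ?_⟩
        intro a ha b hb heqab
        rw [List.mem_singleton.mp hb] at heqab
        exact hsP _ hxs (heqab ▸ ha)
      · intro p hp hpP
        rcases List.mem_append.mp hpP with h | h
        · rcases List.mem_append.mp hp with h' | h'
          · exact (haddmem p (List.mem_reverse.mp h')).2.2
              ((hvis p).mpr (Or.inr (Or.inr h)))
          · exact hsP _ (List.mem_cons_of_mem _ h') h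
        · have hpx : p = (cr, cc) := List.mem_singleton.mp h
          rcases List.mem_append.mp hp with h' | h'
          · exact (haddmem p (List.mem_reverse.mp h')).2.2 (hpx ▸ hxv)
          · exact hxns' (hpx ▸ h')
      · intro p hp t hstep
        simp only [List.mem_append]
        rcases List.mem_append.mp hp with h | h
        · exact Or.inl (hclosed p h t hstep)
        · have hpx : p = (cr, cc) := List.mem_singleton.mp h
          subst hpx
          by_cases htv : t ∈ vis
          · exact Or.inl htv
          · refine Or.inr ((hmemadd' t).mpr ⟨?_, hstep.2.1, htv⟩)
            exact (pvAdjB_iff cr cc t).mpr hstep.2.2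
      · exact List.mem_append.mpr (Or.inl hstartv)
      · intro p hp
        rcases List.mem_cons.mp hp with h | h
        · have := hbb p (h ▸ List.mem_cons_self ..)
          constructor
          · exact le_trans (min_le_left _ _) this.1
          constructor
          · exact le_trans this.2.1 (le_max_left _ _)
          constructor
          · exact le_trans (min_le_left _ _) this.2.2.1
          · exact le_trans this.2.2.2 (le_max_left _ _)
        · rcases List.mem_append.mp h with h' | h'
          · have := hbb p (List.mem_cons_of_mem _ h')
            exact ⟨le_trans (min_le_left _ _) this.1, le_trans this.2.1 (le_max_left _ _),
              le_trans (min_le_left _ _) this.2.2.1, le_trans this.2.2.2 (le_max_left _ _)⟩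
          · rw [List.mem_singleton.mp h']
            exact ⟨min_le_right _ _, le_max_right _ _, min_le_right _ _, le_max_right _ _⟩
      · rcases le_total r1 cr with h | h
        · obtain ⟨p, hp, he⟩ := hat1
          refine ⟨p, ?_, by rw [min_eq_left h, he]⟩
          rcases List.mem_cons.mp hp with h' | h'
          · exact h' ▸ List.mem_cons_self ..
          · exact List.mem_cons_of_mem _ (List.mem_append.mpr (Or.inl h'))
        · exact ⟨(cr, cc), List.mem_cons_of_mem _ (List.mem_append.mpr (Or.inr (List.mem_singleton.mpr rfl))),
            by rw [min_eq_right h]⟩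
      · rcases le_total cr r2 with h | h
        · obtain ⟨p, hp, he⟩ := hat2
          refine ⟨p, ?_, by rw [max_eq_left h, he]⟩
          rcases List.mem_cons.mp hp with h' | h'
          · exact h' ▸ List.mem_cons_self ..
          · exact List.mem_cons_of_mem _ (List.mem_append.mpr (Or.inl h'))
        · exact ⟨(cr, cc), List.mem_cons_of_mem _ (List.mem_append.mpr (Or.inr (List.mem_singleton.mpr rfl))),
            by rw [max_eq_right h]⟩
      · rcases le_total c1 cc with h | h
        · obtain ⟨p, hp, he⟩ := hat3
          refine ⟨p, ?_, by rw [min_eq_left h, he]⟩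
          rcases List.mem_cons.mp hp with h' | h'
          · exact h' ▸ List.mem_cons_self ..
          · exact List.mem_cons_of_mem _ (List.mem_append.mpr (Or.inl h'))
        · exact ⟨(cr, cc), List.mem_cons_of_mem _ (List.mem_append.mpr (Or.inr (List.mem_singleton.mpr rfl))),
            by rw [min_eq_right h]⟩
      · rcases le_total cc c2 with h | h
        · obtain ⟨p, hp, he⟩ := hat4
          refine ⟨p, ?_, by rw [max_eq_left h, he]⟩
          rcases List.mem_cons.mp hp with h' | h'
          · exact h' ▸ List.mem_cons_self ..
          · exact List.mem_cons_of_mem _ (List.mem_append.mpr (Or.inl h'))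
        · exact ⟨(cr, cc), List.mem_cons_of_mem _ (List.mem_append.mpr (Or.inr (List.mem_singleton.mpr rfl))),
            by rw [max_eq_right h]⟩
      · simp only [List.length_append, List.length_singleton]
        omega
-- ===== proof section 5: min/max over the cells list =====
lemma pvMinChar (xs : List Int) (hne : xs ≠ []) :
    (PySem.List.min? xs (fun x => x)).getD 0 ∈ xs ∧
    ∀ y ∈ xs, (PySem.List.min? xs (fun x => x)).getD 0 ≤ y := by
  cases h : PySem.List.min? xs (fun x => x) with
  | none => exact absurd ((PySem.List.min?_eq_none_iff _ _).mp h) hne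
  | some m =>
    simp only [Option.getD_some]
    exact ⟨PySem.List.min?_mem h, fun y hy => PySem.List.min?_isMin h y hy⟩

lemma pvMaxChar (xs : List Int) (hne : xs ≠ []) :
    (PySem.List.max? xs (fun x => x)).getD 0 ∈ xs ∧
    ∀ y ∈ xs, y ≤ (PySem.List.max? xs (fun x => x)).getD 0 := by
  cases h : PySem.List.max? xs (fun x => x) with
  | none => exact absurd ((PySem.List.max?_eq_none_iff _ _).mp h) hne
  | some m =>
    simp only [Option.getD_some]
    exact ⟨PySem.List.max?_mem h, fun y hy => PySem.List.max?_isMax h y hy⟩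

-- ===== proof section 6: the fill loops, pointwise =====
lemma pvGetD_set {α : Type} (l : List α) (i : Nat) (v : α) (j : Nat) (d : α)
    (h : i < l.length) :
    (l.set i v).getD j d = if i = j then v else l.getD j d := by
  by_cases hij : i = j
  · subst hij
    rw [List.getD_eq_getElem?_getD, List.getElem?_set_self h]
    simp
  · rw [List.getD_eq_getElem?_getD, List.getElem?_set_ne hij, ← List.getD_eq_getElem?_getD,
      if_neg hij]

lemma pvSet_getD_self (l : List (List Int)) (i : Nat) (h : i < l.length) :
    l.set i (l.getD i []) = l := by
  have : l.getD i [] = l[i] := by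
    rw [List.getD_eq_getElem?_getD, List.getElem?_eq_getElem h]; rfl
  rw [this, List.set_getElem_self]

-- the inner fill loop only rewrites row ir
lemma pvRowFoldOut (fill ir : Int) (hir : 0 ≤ ir) :
    ∀ (ics : List Int) (o : List (List Int)), (∀ ic ∈ ics, 0 ≤ ic) → ir.toNat < o.length →
    (ics.foldl (fun o ic =>
        PySem.List.pySetD o ir (PySem.List.pySetD (PySem.List.pyGetD o ir []) ic fill)) o)
      = o.set ir.toNat (ics.foldl (fun row ic => PySem.List.pySetD row ic fill) (o.getD ir.toNat [])) := by
  intro ics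
  induction ics with
  | nil =>
    intro o _ hlt
    simp only [List.foldl_nil]
    exact (pvSet_getD_self o ir.toNat hlt).symm
  | cons ic ics ih =>
    intro o hnn hlt
    have hic : 0 ≤ ic := hnn ic (List.mem_cons_self ..)
    have hgetrow : PySem.List.pyGetD o ir [] = o.getD ir.toNat [] :=
      PySem.List.pyGetD_of_nonneg o [] hir
    have hsetrow : ∀ (row : List Int), PySem.List.pySetD row ic fill = row.set ic.toNat fill :=
      fun row => PySem.List.pySetD_of_nonneg row fill hic
    have hseto : ∀ (v : List Int), PySem.List.pySetD o ir v = o.set ir.toNat v :=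
      fun v => PySem.List.pySetD_of_nonneg o v hir
    simp only [List.foldl_cons, hgetrow, hsetrow, hseto]
    rw [ih _ (fun x hx => hnn x (List.mem_cons_of_mem _ hx)) (by simp [hlt])]
    rw [List.set_set]
    congr 1
    rw [pvGetD_set _ _ _ _ _ hlt, if_pos rfl]

-- the row-level fill, pointwise
lemma pvRowFillAux (fill : Int) :
    ∀ (n : Nat) (a : Int) (row : List Int), 0 ≤ a → a + n ≤ (row.length : Int) →
    ((PySem.List.pyRange a (a + n) 1).foldl (fun row ic => PySem.List.pySetD row ic fill) row).length = row.length ∧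
    ∀ j : Nat, ((PySem.List.pyRange a (a + n) 1).foldl (fun row ic => PySem.List.pySetD row ic fill) row).getD j 0
      = if a ≤ (j : Int) ∧ (j : Int) < a + n then fill else row.getD j 0 := by
  intro n
  induction n with
  | zero =>
    intro a row ha hle
    rw [show a + (0 : Nat) = a by simp, PySem.List.pyRange_one_eq_nil (le_refl a)]
    simp only [List.foldl_nil, true_and]
    intro j
    rw [if_neg (by omega)]
  | succ n ih =>
    intro a row ha hle
    have hsplit : PySem.List.pyRange a (a + (n + 1 : Nat)) 1
        = PySem.List.pyRange a (a + n) 1 ++ [a + n] := by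
      rw [show a + ((n + 1 : Nat) : Int) = (a + n) + 1 by push_cast; ring]
      exact PySem.List.pyRange_one_succ_right (by omega)
    obtain ⟨ihlen, ihget⟩ := ih a row ha (by push_cast at hle ⊢; omega)
    rw [hsplit, List.foldl_append]
    set res := (PySem.List.pyRange a (a + n) 1).foldl (fun row ic => PySem.List.pySetD row ic fill) row
    have hset : PySem.List.pySetD res (a + n) fill = res.set (a + n).toNat fill :=
      PySem.List.pySetD_of_nonneg res fill (by omega)
    have hlt : (a + n).toNat < res.length := by
      rw [ihlen]; push_cast at hle; omega
    simp only [List.foldl_cons, List.foldl_nil, hset]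
    constructor
    · rw [List.length_set, ihlen]
    · intro j
      rw [pvGetD_set _ _ _ _ _ hlt]
      by_cases hj : (a + n).toNat = j
      · rw [if_pos hj, if_pos (by omega)]
      · rw [if_neg hj, ihget j]
        by_cases hcond : a ≤ (j : Int) ∧ (j : Int) < a + n
        · rw [if_pos hcond, if_pos (by push_cast; omega)]
        · rw [if_neg hcond, if_neg (by push_cast at hcond ⊢; omega)]

-- the whole fill, pointwise
lemma pvFillAux (fill c1 c2 : Int) (hc1 : 0 ≤ c1) :
    ∀ (n : Nat) (a : Int) (o : List (List Int)), 0 ≤ a →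
    (∀ k : Nat, (a ≤ (k : Int) ∧ (k : Int) < a + n) →
        k < o.length ∧ (c2 : Int) ≤ ((o.getD k []).length : Int)) →
    ((PySem.List.pyRange a (a + n) 1).foldl (pvFillRowA fill c1 c2) o).length = o.length ∧
    (∀ k : Nat, (((PySem.List.pyRange a (a + n) 1).foldl (pvFillRowA fill c1 c2) o).getD k []).length
        = (o.getD k []).length) ∧
    (∀ i j : Nat, (((PySem.List.pyRange a (a + n) 1).foldl (pvFillRowA fill c1 c2) o).getD i []).getD j 0
        = if (a ≤ (i : Int) ∧ (i : Int) < a + n) ∧ c1 < (j : Int) ∧ (j : Int) < c2 then fill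
          else (o.getD i []).getD j 0) := by
  intro n
  induction n with
  | zero =>
    intro a o ha hb
    rw [show a + (0 : Nat) = a by simp, PySem.List.pyRange_one_eq_nil (le_refl a)]
    refine ⟨by simp, fun k => by simp, fun i j => ?_⟩
    simp only [List.foldl_nil]
    rw [if_neg (by omega)]
  | succ n ih =>
    intro a o ha hb
    have hsplit : PySem.List.pyRange a (a + (n + 1 : Nat)) 1
        = PySem.List.pyRange a (a + n) 1 ++ [a + n] := by
      rw [show a + ((n + 1 : Nat) : Int) = (a + n) + 1 by push_cast; ring]
      exact PySem.List.pyRange_one_succ_right (by omega)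
    obtain ⟨ihlen, ihrow, ihget⟩ := ih a o ha (fun k hk => hb k (by push_cast at hk ⊢; omega))
    rw [hsplit, List.foldl_append]
    set res := (PySem.List.pyRange a (a + n) 1).foldl (pvFillRowA fill c1 c2) o with hres
    have hbn : (a + n).toNat < o.length ∧ (c2 : Int) ≤ ((o.getD (a + n).toNat []).length : Int) := by
      have := hb (a + n).toNat (by push_cast; omega)
      exact this
    have hlt : (a + n).toNat < res.length := by rw [ihlen]; exact hbn.1
    have hrowc2 : (c2 : Int) ≤ ((res.getD (a + n).toNat []).length : Int) := by
      rw [ihrow]; exact hbn.2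
    have hout : pvFillRowA fill c1 c2 res (a + n) =
        res.set (a + n).toNat ((PySem.List.pyRange (c1 + 1) c2 1).foldl
          (fun row ic => PySem.List.pySetD row ic fill) (res.getD (a + n).toNat [])) := by
      unfold pvFillRowA
      exact pvRowFoldOut fill (a + n) (by omega) _ res
        (fun ic hic => by have := (PySem.List.mem_pyRange_one).mp hic; omega) hlt
    simp only [List.foldl_cons, List.foldl_nil, hout]
    refine ⟨by rw [List.length_set, ihlen], ?_, ?_⟩
    · intro k
      rw [pvGetD_set _ _ _ _ _ hlt]
      by_cases hk : (a + n).toNat = k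
      · subst hk
        rw [if_pos rfl]
        rcases le_total c2 (c1 + 1) with hcc | hcc
        · rw [show PySem.List.pyRange (c1 + 1) c2 1 = [] from PySem.List.pyRange_one_eq_nil hcc]
          simp only [List.foldl_nil]
          exact ihrow _
        · have hc2eq : c1 + 1 + ((c2 - (c1 + 1)).toNat : Int) = c2 := by omega
          have hrowfill := pvRowFillAux fill (c2 - (c1 + 1)).toNat (c1 + 1)
            (res.getD (a + n).toNat []) (by omega) (by omega)
          rw [hc2eq] at hrowfill
          rw [hrowfill.1, ihrow]
      · rw [if_neg hk]
        exact ihrow k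
    · intro i j
      rw [pvGetD_set _ _ _ _ _ hlt]
      by_cases hi : (a + n).toNat = i
      · subst hi
        rcases le_total c2 (c1 + 1) with hcc | hcc
        · rw [show PySem.List.pyRange (c1 + 1) c2 1 = [] from PySem.List.pyRange_one_eq_nil hcc]
          simp only [List.foldl_nil, ite_self]
          rw [ihget]
          rw [if_neg (by omega), if_neg (by omega)]
        · rw [if_pos rfl]
          have hc2eq : c1 + 1 + ((c2 - (c1 + 1)).toNat : Int) = c2 := by omega
          have hrowfill := pvRowFillAux fill (c2 - (c1 + 1)).toNat (c1 + 1)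
            (res.getD (a + n).toNat []) (by omega) (by omega)
          rw [hc2eq] at hrowfill
          rw [hrowfill.2 j, ihget]
          by_cases hj : c1 + 1 ≤ (j : Int) ∧ (j : Int) < c2
          · rw [if_pos hj, if_pos (by push_cast at hj ⊢; omega)]
          · rw [if_neg hj, if_neg (by omega), if_neg (by push_cast at hj ⊢; omega)]
      · rw [if_neg hi, ihget]
        by_cases hcond : (a ≤ (i : Int) ∧ (i : Int) < a + n) ∧ c1 < (j : Int) ∧ (j : Int) < c2
        · rw [if_pos hcond, if_pos (by push_cast at hcond ⊢; omega)]
        · rw [if_neg hcond, if_neg (by push_cast at hcond ⊢; omega)]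
-- ===== proof section 7: the final render pass, pointwise =====
lemma pvGetD_eq_getElem' {α : Type} (l : List α) (d : α) (i : Nat) (h : i < l.length) :
    l.getD i d = l[i] := by
  rw [List.getD_eq_getElem?_getD, List.getElem?_eq_getElem h]
  rfl

lemma pvGridExt (x y : List (List Int)) (hlen : x.length = y.length)
    (hrow : ∀ i : Nat, (x.getD i []).length = (y.getD i []).length)
    (hval : ∀ i j : Nat, i < x.length → j < (x.getD i []).length →
      (x.getD i []).getD j 0 = (y.getD i []).getD j 0) : x = y := by
  refine List.ext_getElem hlen ?_
  intro i hi hi'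
  refine List.ext_getElem ?_ ?_
  · have := hrow i
    rw [pvGetD_eq_getElem' _ _ _ hi, pvGetD_eq_getElem' _ _ _ hi'] at this
    exact this
  · intro j hj hj'
    have := hval i j hi (by rw [pvGetD_eq_getElem' _ _ _ hi]; exact hj)
    rw [pvGetD_eq_getElem' _ _ _ hi, pvGetD_eq_getElem' _ _ _ hi'] at this
    rw [pvGetD_eq_getElem' _ _ _ hj, pvGetD_eq_getElem' _ _ _ hj'] at this
    exact this

lemma pvRender_length (grid : List (List Int)) (plan : List (Int × Int × Int × Int × Int)) :
    (pvRenderB grid plan).length = grid.length := by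
  simp [pvRenderB, PySem.List.length_enumerate]

lemma pvRender_row (grid : List (List Int)) (plan : List (Int × Int × Int × Int × Int))
    (i : Nat) (hi : i < grid.length) :
    (pvRenderB grid plan).getD i [] =
      (PySem.List.enumerate grid[i] 0).map (fun q =>
        match plan.reverse.find? (fun e => pvCovers e ((i : Int)) q.1) with
        | some e => e.2.2.2.2
        | none => q.2) := by
  have hi' : i < (PySem.List.enumerate grid 0).length := by
    rw [PySem.List.length_enumerate]; exact hi
  rw [pvGetD_eq_getElem' _ _ _ (by simpa [pvRenderB, PySem.List.length_enumerate] using hi)]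
  simp only [pvRenderB, List.getElem_map, PySem.List.getElem_enumerate, zero_add]

lemma pvRender_rowlen (grid : List (List Int)) (plan : List (Int × Int × Int × Int × Int))
    (i : Nat) :
    ((pvRenderB grid plan).getD i []).length = (grid.getD i []).length := by
  by_cases hi : i < grid.length
  · rw [pvRender_row grid plan i hi, pvGetD_eq_getElem' _ _ _ hi]
    simp [PySem.List.length_enumerate]
  · have h1 : (pvRenderB grid plan).getD i [] = [] := by
      rw [List.getD_eq_getElem?_getD, List.getElem?_eq_none (by rw [pvRender_length]; omega)]
      rfl
    have h2 : grid.getD i [] = [] := by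
      rw [List.getD_eq_getElem?_getD, List.getElem?_eq_none (by omega)]
      rfl
    rw [h1, h2]

lemma pvRender_get (grid : List (List Int)) (plan : List (Int × Int × Int × Int × Int))
    (i j : Nat) (hi : i < grid.length) (hj : j < (grid.getD i []).length) :
    ((pvRenderB grid plan).getD i []).getD j 0 =
      match plan.reverse.find? (fun e => pvCovers e i j) with
      | some e => e.2.2.2.2
      | none => (grid.getD i []).getD j 0 := by
  rw [pvRender_row grid plan i hi]
  rw [pvGetD_eq_getElem' _ _ _ hi] at hj ⊢
  have hj' : j < (PySem.List.enumerate grid[i] 0).length := by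
    rw [PySem.List.length_enumerate]; exact hj
  rw [pvGetD_eq_getElem' _ _ _ (by simpa [PySem.List.length_enumerate] using hj),
    List.getElem_map, PySem.List.getElem_enumerate, zero_add, pvGetD_eq_getElem' _ _ _ hj]

lemma pvRender_nil (grid : List (List Int)) : pvRenderB grid [] = grid := by
  unfold pvRenderB
  rw [show ([] : List (Int × Int × Int × Int × Int)).reverse = [] from rfl]
  have hinner : ∀ (row : List Int),
      (PySem.List.enumerate row 0).map (fun q =>
        match List.find? (fun e => pvCovers e ((0:Int) + 0) q.1) [] with
        | some e => e.2.2.2.2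
        | none => q.2) = row := by
    intro row
    have : ∀ q : Int × Int, (match List.find? (fun e => pvCovers e ((0:Int) + 0) q.1)
        ([] : List (Int × Int × Int × Int × Int)) with
        | some e => e.2.2.2.2
        | none => q.2) = q.2 := fun q => rfl
    simp only [List.find?_nil]
    exact PySem.List.map_snd_enumerate row 0
  calc (PySem.List.enumerate grid 0).map (fun p =>
        (PySem.List.enumerate p.2 0).map (fun q =>
          match List.find? (fun e => pvCovers e p.1 q.1) [] with
          | some e => e.2.2.2.2
          | none => q.2))
      = (PySem.List.enumerate grid 0).map (fun p => p.2) := by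
        refine List.map_congr_left ?_
        intro p _
        simp only [List.find?_nil]
        exact PySem.List.map_snd_enumerate p.2 0
    _ = grid := PySem.List.map_snd_enumerate grid 0

lemma pvRender_snoc (grid : List (List Int)) (plan : List (Int × Int × Int × Int × Int))
    (e : Int × Int × Int × Int × Int) (i j : Nat) (hi : i < grid.length)
    (hj : j < (grid.getD i []).length) :
    ((pvRenderB grid (plan ++ [e])).getD i []).getD j 0 =
      if pvCovers e i j then e.2.2.2.2 else ((pvRenderB grid plan).getD i []).getD j 0 := by
  rw [pvRender_get grid _ i j hi hj, pvRender_get grid plan i j hi hj]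
  rw [List.reverse_append, List.reverse_singleton, List.singleton_append]
  by_cases hc : pvCovers e i j = true
  · simp [hc]
  · simp [hc]
-- ===== proof section 8: both ports scan the same cell sequence =====
lemma pvFoldNested {σ : Type} (f : σ → Int → Int → σ) (rs cs : List Int) :
    ∀ (init : σ),
    (rs.flatMap (fun r => cs.map (fun c => (r, c)))).foldl (fun st rc => f st rc.1 rc.2) init
      = rs.foldl (fun st r => cs.foldl (fun st c => f st r c) st) init := by
  induction rs with
  | nil => intro init; rfl
  | cons r rs ih =>
    intro init
    simp only [List.flatMap_cons, List.foldl_append, List.foldl_cons, List.foldl_map]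
    rw [ih]

lemma pvDecodeRow (R C : Nat) (hC : 0 < C) :
    (PySem.List.pyRange ((R : Int) * (C : Int)) ((R : Int) * (C : Int) + (C : Int)) 1).map
      (fun idx => (PySem.Int.floordiv idx (C : Int), PySem.Int.mod idx (C : Int)))
    = (PySem.List.pyRange 0 (C : Int) 1).map (fun c => ((R : Int), c)) := by
  rw [PySem.List.pyRange_one ((R : Int) * (C : Int)) _, PySem.List.pyRange_one 0 (C : Int)]
  simp only [add_sub_cancel_left, sub_zero, Int.toNat_natCast, List.map_map]
  refine List.map_congr_left ?_
  intro k hk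
  have hkC : k < C := List.mem_range.mp hk
  have hCpos : (0 : Int) < (C : Int) := by exact_mod_cast hC
  have hdiv : PySem.Int.floordiv ((R : Int) * (C : Int) + (k : Int)) (C : Int) = (R : Int) := by
    rw [PySem.Int.floordiv_eq_iff_of_pos hCpos]
    constructor
    · exact le_add_of_nonneg_right (by positivity)
    · rw [add_mul, one_mul]
      have : (k : Int) < (C : Int) := by exact_mod_cast hkC
      linarith
  have hmod : PySem.Int.mod ((R : Int) * (C : Int) + (k : Int)) (C : Int) = (k : Int) := by
    have hid := PySem.Int.floordiv_mul_add_mod ((R : Int) * (C : Int) + (k : Int)) (C : Int)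
    rw [hdiv] at hid
    linarith
  simp only [Function.comp_apply, hdiv, hmod, zero_add]

lemma pvDecode_eq (R C : Nat) :
    (PySem.List.pyRange 0 ((R : Int) * (C : Int)) 1).map
      (fun idx => (PySem.Int.floordiv idx (C : Int), PySem.Int.mod idx (C : Int)))
    = (PySem.List.pyRange 0 (R : Int) 1).flatMap
        (fun r => (PySem.List.pyRange 0 (C : Int) 1).map (fun c => (r, c))) := by
  rcases Nat.eq_zero_or_pos C with hC | hC
  · subst hC
    simp only [Nat.cast_zero, mul_zero]
    rw [show PySem.List.pyRange 0 (0 : Int) 1 = [] from PySem.List.pyRange_one_eq_nil (le_refl _)]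
    simp only [List.map_nil]
    symm
    rw [List.flatMap_eq_nil_iff]
    intro l hl
    obtain ⟨r, _, rfl⟩ := List.mem_map.mp hl
    rfl
  · induction R with
    | zero =>
      simp only [Nat.cast_zero, zero_mul]
      rw [show PySem.List.pyRange 0 (0 : Int) 1 = [] from PySem.List.pyRange_one_eq_nil (le_refl _)]
      rfl
    | succ R ih =>
      have hCpos : (0 : Int) ≤ (R : Int) * (C : Int) := by positivity
      have hcast : ((R + 1 : Nat) : Int) * (C : Int) = (R : Int) * (C : Int) + (C : Int) := by
        push_cast; ring
      have hsplit1 : PySem.List.pyRange 0 (((R + 1 : Nat) : Int) * (C : Int)) 1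
          = PySem.List.pyRange 0 ((R : Int) * (C : Int)) 1 ++
            PySem.List.pyRange ((R : Int) * (C : Int)) ((R : Int) * (C : Int) + (C : Int)) 1 := by
        rw [hcast]
        exact PySem.List.pyRange_one_append 0 ((R : Int) * (C : Int)) _ hCpos (by omega)
      have hsplit2 : PySem.List.pyRange 0 ((R + 1 : Nat) : Int) 1
          = PySem.List.pyRange 0 (R : Int) 1 ++ [(R : Int)] := by
        rw [show ((R + 1 : Nat) : Int) = (R : Int) + 1 by push_cast; ring]
        exact PySem.List.pyRange_one_succ_right (by positivity)
      rw [hsplit1, hsplit2, List.map_append, List.flatMap_append, ih]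
      congr 1
      rw [pvDecodeRow R C hC]
      simp only [List.flatMap_cons, List.flatMap_nil, List.append_nil]
-- ===== proof section 9: lock-step simulation of the two scans =====
def pvRelInv (grid : List (List Int)) (a : List (List Int) × List (List Bool))
    (b : PySem.Set (Int × Int) × List (Int × Int × Int × Int × Int)) : Prop :=
  pvVisInv grid a.2 b.1 ∧ b.1.Nodup ∧ (∀ p ∈ b.1, pvGood grid p) ∧ pvClosed grid b.1 ∧
  a.1 = pvRenderB grid b.2

lemma pvFoldRel {σ τ γ : Type} (R : σ → τ → Prop) (f : σ → γ → σ) (g : τ → γ → τ) :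
    ∀ (l : List γ) (a : σ) (b : τ), R a b →
      (∀ x ∈ l, ∀ a b, R a b → R (f a x) (g b x)) → R (l.foldl f a) (l.foldl g b) := by
  intro l
  induction l with
  | nil => intro a b h _; exact h
  | cons x l ih =>
    intro a b h hstep
    exact ih _ _ (hstep x (List.mem_cons_self ..) a b h)
      (fun y hy => hstep y (List.mem_cons_of_mem _ hy))

lemma pvBody_rel (grid : List (List Int)) (hpre : ∀ row ∈ grid, (grid.headD []).length ≤ row.length)
    (r c : Int) (hin : pvInR grid (r, c)) :
    ∀ a b, pvRelInv grid a b →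
    pvRelInv grid
      (pvBodyA grid (grid.length : Int) ((grid.headD []).length : Int) a r c)
      (pvBodyB grid (grid.length : Int) ((grid.headD []).length : Int) b r c) := by
  intro a b hrel
  obtain ⟨hvinv, hnd, hgood, hclosed, hout⟩ := hrel
  have hAt : pvAt grid r c = pvCell grid r c := rfl
  by_cases hguard : pvCell grid r c = 5 ∧ (r, c) ∉ b.1
  swap
  · -- guard false on both sides
    have hgB : ¬ (pvAt grid r c = 5 ∧ (r, c) ∉ b.1) := by rw [hAt]; exact hguard
    have hgA : ¬ (pvCell grid r c = 5 ∧ ¬ pvVGet a.2 r c = true) := by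
      intro ⟨h5, hv⟩
      exact hguard ⟨h5, fun hm => hv ((hvinv.2.2 (r, c) hin).mpr hm)⟩
    rw [pvBodyA, pvBodyB, if_neg hgA, if_neg hgB]
    exact ⟨hvinv, hnd, hgood, hclosed, hout⟩
  · obtain ⟨h5, hmem⟩ := hguard
    have hgB : pvAt grid r c = 5 ∧ (r, c) ∉ b.1 := ⟨by rw [hAt]; exact h5, hmem⟩
    have hgA : pvCell grid r c = 5 ∧ ¬ pvVGet a.2 r c = true :=
      ⟨h5, fun hv => hmem ((hvinv.2.2 (r, c) hin).mp hv)⟩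
    have hstart : pvGood grid (r, c) := ⟨hin, h5⟩
    have hdisj : ∀ p, pvReach grid (r, c) p → p ∉ b.1 := fun p hp => pvNotMem_comp hclosed hmem hp
    have hfuel : ((grid.length : Int)).toNat * (((grid.headD []).length : Int)).toNat + 1
        = grid.length * (grid.headD []).length + 1 := by
      simp [Int.toNat_natCast]
    -- characterize A's BFS
    obtain ⟨S', hinv', hS'mem, hcellsmem⟩ :=
      pvBfsA_spec rfl rfl hstart hdisj
        ((grid.length : Int).toNat * (((grid.headD []).length : Int)).toNat + 1)
        [(r, c)] (pvVSet a.2 r c) [(r, c)] (b.1 ++ [(r, c)]) []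
        (pvVisInv_set hvinv hin)
        (by intro p; simp [List.mem_append])
        (by intro p hp; rw [List.mem_singleton.mp hp]; exact Relation.ReflTransGen.refl)
        (by intro p hp; exact absurd hp (List.not_mem_nil))
        (List.nodup_singleton _) List.nodup_nil
        (by intro p _ hp; exact absurd hp (List.not_mem_nil))
        (by intro p hp; exact absurd hp (List.not_mem_nil))
        (by intro p; simp)
        (by simp)
        (by rw [hfuel]; simp)
    -- characterize B's DFS
    have haddB : PySem.Set.add b.1 (r, c) = b.1 ++ [(r, c)] := PySem.Set.add_of_not_mem hmem
    obtain ⟨hdmem, hdnd, hbb, ha1, ha2, ha3, ha4⟩ :=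
      pvDfsB_spec rfl rfl hstart hdisj
        ((grid.length : Int).toNat * (((grid.headD []).length : Int)).toNat + 1)
        [(r, c)] (b.1 ++ [(r, c)]) [] r r c c
        (by intro p; simp [List.mem_append])
        (by rw [List.nodup_append]
            exact ⟨hnd, List.nodup_singleton _, by
              intro x hx y hy heq
              rw [List.mem_singleton.mp hy] at heq
              exact hmem (heq ▸ hx)⟩)
        (by intro p hp; rw [List.mem_singleton.mp hp]; exact Relation.ReflTransGen.refl)
        (by intro p hp; exact absurd hp (List.not_mem_nil))
        (List.nodup_singleton _) List.nodup_nil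
        (by intro p _ hp; exact absurd hp (List.not_mem_nil))
        (by intro p hp; exact absurd hp (List.not_mem_nil))
        (by simp)
        (by intro p hp
            rw [show p = (r, c) by
              rcases List.mem_cons.mp hp with h | h
              · exact h
              · exact absurd h (List.not_mem_nil)]
            exact ⟨le_refl _, le_refl _, le_refl _, le_refl _⟩)
        ⟨(r, c), List.mem_cons_self .., rfl⟩ ⟨(r, c), List.mem_cons_self .., rfl⟩
        ⟨(r, c), List.mem_cons_self .., rfl⟩ ⟨(r, c), List.mem_cons_self .., rfl⟩
        (by rw [hfuel]; simp)
    set br := pvBfsA grid (grid.length : Int) ((grid.headD []).length : Int)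
      ((grid.length : Int).toNat * (((grid.headD []).length : Int)).toNat + 1)
      [(r, c)] (pvVSet a.2 r c) [(r, c)] with hbr
    set d := pvDfsB grid (grid.length : Int) ((grid.headD []).length : Int)
      ((grid.length : Int).toNat * (((grid.headD []).length : Int)).toNat + 1)
      [(r, c)] (b.1 ++ [(r, c)]) r r c c with hd
    -- the cells list of A is the component; its extrema equal B's running bounding box
    have hcne : br.2 ≠ [] := by
      intro hnil
      have := (hcellsmem (r, c)).mpr Relation.ReflTransGen.refl
      rw [hnil] at this
      exact List.not_mem_nil this
    have hmapne : ∀ f : Int × Int → Int, br.2.map f ≠ [] := by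
      intro f h
      exact hcne (List.map_eq_nil_iff.mp h)
    obtain ⟨hm1, hm1le⟩ := pvMinChar (br.2.map (·.1)) (hmapne _)
    obtain ⟨hm2, hm2le⟩ := pvMaxChar (br.2.map (·.1)) (hmapne _)
    obtain ⟨hm3, hm3le⟩ := pvMinChar (br.2.map (·.2)) (hmapne _)
    obtain ⟨hm4, hm4le⟩ := pvMaxChar (br.2.map (·.2)) (hmapne _)
    have her1 : (PySem.List.min? (br.2.map (·.1)) (fun x => x)).getD 0 = d.2.1 := by
      obtain ⟨p, hp, hpe⟩ := List.mem_map.mp hm1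
      obtain ⟨p', hp', hpe'⟩ := ha1
      refine le_antisymm ?_ ?_
      · rw [← hpe']
        exact hm1le _ (List.mem_map.mpr ⟨p', (hcellsmem p').mpr hp', rfl⟩)
      · rw [← hpe]
        exact (hbb p ((hcellsmem p).mp hp)).1
    have her2 : (PySem.List.max? (br.2.map (·.1)) (fun x => x)).getD 0 = d.2.2.1 := by
      obtain ⟨p, hp, hpe⟩ := List.mem_map.mp hm2
      obtain ⟨p', hp', hpe'⟩ := ha2
      refine le_antisymm ?_ ?_
      · rw [← hpe]
        exact (hbb p ((hcellsmem p).mp hp)).2.1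
      · rw [← hpe']
        exact hm2le _ (List.mem_map.mpr ⟨p', (hcellsmem p').mpr hp', rfl⟩)
    have her3 : (PySem.List.min? (br.2.map (·.2)) (fun x => x)).getD 0 = d.2.2.2.1 := by
      obtain ⟨p, hp, hpe⟩ := List.mem_map.mp hm3
      obtain ⟨p', hp', hpe'⟩ := ha3
      refine le_antisymm ?_ ?_
      · rw [← hpe']
        exact hm3le _ (List.mem_map.mpr ⟨p', (hcellsmem p').mpr hp', rfl⟩)
      · rw [← hpe]
        exact (hbb p ((hcellsmem p).mp hp)).2.2.1
    have her4 : (PySem.List.max? (br.2.map (·.2)) (fun x => x)).getD 0 = d.2.2.2.2 := by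
      obtain ⟨p, hp, hpe⟩ := List.mem_map.mp hm4
      obtain ⟨p', hp', hpe'⟩ := ha4
      refine le_antisymm ?_ ?_
      · rw [← hpe]
        exact (hbb p ((hcellsmem p).mp hp)).2.2.2
      · rw [← hpe']
        exact hm4le _ (List.mem_map.mpr ⟨p', (hcellsmem p').mpr hp', rfl⟩)
    -- shared facts for the new visited structures
    have hvinvd : pvVisInv grid br.1 d.1 := by
      refine pvVisInv_congr (fun p => ?_) hinv'
      rw [hS'mem p, hdmem p]
    have hgoodd : ∀ p ∈ d.1, pvGood grid p := by
      intro p hp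
      rcases (hdmem p).mp hp with h | h
      · exact hgood p h
      · exact pvReach_good hstart h
    have hcld : pvClosed grid d.1 := by
      intro p hp t hstep
      rcases (hdmem p).mp hp with h | h
      · exact (hdmem t).mpr (Or.inl (hclosed p h t hstep))
      · exact (hdmem t).mpr (Or.inr (h.tail hstep))
    rw [pvBodyA, pvBodyB, if_pos hgA, if_pos hgB]
    rw [haddB]
    simp only [← hbr, ← hd, her1, her2, her3, her4]
    by_cases hfill : 1 < d.2.2.1 - d.2.1 ∧ 1 < d.2.2.2.2 - d.2.2.2.1
    · rw [if_pos (show 0 < d.2.2.1 - d.2.1 - 1 ∧ 0 < d.2.2.2.2 - d.2.2.2.1 - 1 by omega),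
        if_pos hfill]
      refine ⟨hvinvd, hdnd, hgoodd, hcld, ?_⟩
      -- the fill loop applied to the rendered plan is the render of the extended plan
      obtain ⟨p1, hp1r, hp1e⟩ := ha1
      obtain ⟨p2, hp2r, hp2e⟩ := ha2
      obtain ⟨p3, hp3r, hp3e⟩ := ha3
      obtain ⟨p4, hp4r, hp4e⟩ := ha4
      have hg1 := pvReach_good hstart hp1r
      have hg2 := pvReach_good hstart hp2r
      have hg3 := pvReach_good hstart hp3r
      have hg4 := pvReach_good hstart hp4r
      have hb1 : 0 ≤ d.2.1 ∧ d.2.1 < (grid.length : Int) := by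
        have := hg1.1; unfold pvInR at this; omega
      have hb2 : 0 ≤ d.2.2.1 ∧ d.2.2.1 < (grid.length : Int) := by
        have := hg2.1; unfold pvInR at this; omega
      have hb3 : 0 ≤ d.2.2.2.1 ∧ d.2.2.2.1 < ((grid.headD []).length : Int) := by
        have := hg3.1; unfold pvInR at this; omega
      have hb4 : 0 ≤ d.2.2.2.2 ∧ d.2.2.2.2 < ((grid.headD []).length : Int) := by
        have := hg4.1; unfold pvInR at this; omega
      have hrowc2 : ∀ k : Nat, k < grid.length →
          (d.2.2.2.2 : Int) ≤ ((grid.getD k []).length : Int) := by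
        intro k hk
        have hmemk : grid.getD k [] ∈ grid := by
          rw [pvGetD_eq_getElem' _ _ _ hk]
          exact List.getElem_mem hk
        have := hpre _ hmemk
        omega
      have hfa := pvFillAux (5 + min (d.2.2.1 - d.2.1 - 1) (d.2.2.2.2 - d.2.2.2.1 - 1))
        d.2.2.2.1 d.2.2.2.2 (by omega) (d.2.2.1 - (d.2.1 + 1)).toNat (d.2.1 + 1)
        (pvRenderB grid b.2) (by omega)
        (by intro k hk
            rw [pvRender_length] at *
            constructor
            · have hk2 : (k : Int) < d.2.2.1 := by omega
              have := hb2.2; omega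
            · rw [pvRender_rowlen]
              refine hrowc2 k ?_
              have hk2 : (k : Int) < d.2.2.1 := by omega
              have := hb2.2; omega)
      have hc2eq : d.2.1 + 1 + ((d.2.2.1 - (d.2.1 + 1)).toNat : Int) = d.2.2.1 := by omega
      rw [hc2eq] at hfa
      rw [hout]
      dsimp only
      refine pvGridExt _ _ ?_ ?_ ?_
      · rw [hfa.1, pvRender_length, pvRender_length]
      · intro i
        rw [hfa.2.1 i, pvRender_rowlen, pvRender_rowlen]
      · intro i j hi hj
        rw [hfa.1, pvRender_length] at hi
        rw [hfa.2.1 i, pvRender_rowlen] at hj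
        rw [hfa.2.2 i j, pvRender_snoc grid b.2 _ i j hi hj]
        have hcol : 5 + min (d.2.2.1 - d.2.1 - 1) (d.2.2.2.2 - d.2.2.2.1 - 1)
            = 5 + min (d.2.2.1 - d.2.1) (d.2.2.2.2 - d.2.2.2.1) - 1 := by
          rcases le_total (d.2.2.1 - d.2.1) (d.2.2.2.2 - d.2.2.2.1) with h | h
          · rw [min_eq_left (by omega), min_eq_left h]; ring
          · rw [min_eq_right (by omega), min_eq_right h]; ring
        have hiff : ((d.2.1 + 1 ≤ (i : Int) ∧ (i : Int) < d.2.2.1) ∧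
              d.2.2.2.1 < (j : Int) ∧ (j : Int) < d.2.2.2.2) ↔
            pvCovers (d.2.1, d.2.2.1, d.2.2.2.1, d.2.2.2.2,
              5 + min (d.2.2.1 - d.2.1) (d.2.2.2.2 - d.2.2.2.1) - 1) i j = true := by
          unfold pvCovers
          rw [decide_eq_true_iff]
          dsimp only
          constructor <;> intro h <;> omega
        by_cases hcond : (d.2.1 + 1 ≤ (i : Int) ∧ (i : Int) < d.2.2.1) ∧
            d.2.2.2.1 < (j : Int) ∧ (j : Int) < d.2.2.2.2
        · rw [if_pos hcond, if_pos (hiff.mp hcond)]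
          exact hcol
        · rw [if_neg hcond, if_neg (fun hc => hcond (hiff.mpr hc))]
    · rw [if_neg (show ¬ (0 < d.2.2.1 - d.2.1 - 1 ∧ 0 < d.2.2.2.2 - d.2.2.2.1 - 1) by omega),
        if_neg hfill]
      exact ⟨hvinvd, hdnd, hgoodd, hcld, hout⟩

-- ===== VERDICT (by name: the statement is the Claim_ definition above) =====

theorem solve_c0f76784_spec : Claim_equal_solve_c0f76784 := by
  intro grid _ hpre
  obtain ⟨hne, hrowlen⟩ := hpre
  unfold Spec_solve_c0f76784 solve_c0f76784 solve_c0f76784_alt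
  have hlen : PySem.List.len grid = (grid.length : Int) := by
    simp [PySem.List.len_eq]
  have hcols : PySem.List.len (PySem.List.pyGetD grid 0 []) = ((grid.headD []).length : Int) := by
    rcases grid with _ | ⟨g0, gs⟩
    · exact absurd rfl hne
    · simp [PySem.List.len_eq, PySem.List.pyGetD_zero]
  simp only [hlen, hcols, Int.toNat_natCast, PySem.List.slice_none_none, List.map_id']
  set L := (PySem.List.pyRange 0 (grid.length : Int) 1).flatMap
    (fun r => (PySem.List.pyRange 0 ((grid.headD []).length : Int) 1).map (fun c => (r, c))) with hL
  have hstep : ∀ x ∈ L, ∀ a b, pvRelInv grid a b →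
      pvRelInv grid (pvBodyA grid (grid.length : Int) ((grid.headD []).length : Int) a x.1 x.2)
        (pvBodyB grid (grid.length : Int) ((grid.headD []).length : Int) b x.1 x.2) := by
    intro x hx a b hrel
    have hinr : pvInR grid (x.1, x.2) := by
      rw [hL] at hx
      obtain ⟨r, hr, hx2⟩ := List.mem_flatMap.mp hx
      obtain ⟨c, hc, rfl⟩ := List.mem_map.mp hx2
      have h1 := PySem.List.mem_pyRange_one.mp hr
      have h2 := PySem.List.mem_pyRange_one.mp hc
      exact ⟨h1.1, h1.2, h2.1, h2.2⟩
    exact pvBody_rel grid hrowlen x.1 x.2 hinr a b hrel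
  have hinit : pvRelInv grid
      (grid, List.replicate grid.length (List.replicate (grid.headD []).length false))
      (PySem.Set.empty, []) :=
    ⟨pvVisInv_init grid, List.nodup_nil, fun p hp => absurd hp (List.not_mem_nil),
     fun p hp _ _ => absurd hp (List.not_mem_nil), (pvRender_nil grid).symm⟩
  have hrel := pvFoldRel (pvRelInv grid)
    (fun st rc => pvBodyA grid (grid.length : Int) ((grid.headD []).length : Int) st rc.1 rc.2)
    (fun st rc => pvBodyB grid (grid.length : Int) ((grid.headD []).length : Int) st rc.1 rc.2)
    L _ _ hinit hstep
  have hA := pvFoldNested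
    (fun st r c => pvBodyA grid (grid.length : Int) ((grid.headD []).length : Int) st r c)
    (PySem.List.pyRange 0 (grid.length : Int) 1)
    (PySem.List.pyRange 0 ((grid.headD []).length : Int) 1)
    (grid, List.replicate grid.length (List.replicate (grid.headD []).length false))
  have hB : (PySem.List.pyRange 0 ((grid.length : Int) * ((grid.headD []).length : Int)) 1).foldl
      (fun st idx => pvBodyB grid (grid.length : Int) ((grid.headD []).length : Int) st
        (PySem.Int.floordiv idx ((grid.headD []).length : Int))
        (PySem.Int.mod idx ((grid.headD []).length : Int)))
      (PySem.Set.empty, [])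
      = L.foldl (fun st rc => pvBodyB grid (grid.length : Int) ((grid.headD []).length : Int) st rc.1 rc.2)
          (PySem.Set.empty, []) := by
    rw [hL, ← pvDecode_eq grid.length (grid.headD []).length, List.foldl_map]
  rw [hB, ← hA]
  exact hrel.2.2.2.2
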